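-- pv_equiv track=rewrite | github.com/hyunjongkimmath/trouver | trouver/helper.py | _str_parts
-- ===== SOURCE A (Python) =====
-- def _str_parts(string, replace_ranges, replace_with):
--     """Divide `string` into parts divided outside of `replace_ranges`
--     and with `replace_with` inserted."""
--     str_parts = []
--     for i, replace_string in enumerate(replace_ranges):
--         replace_string = replace_with[i]
--         if i > 0 and len(replace_ranges[i-1]) == 1:
--             unreplaced_start_index = len(string)
--         elif i > 0 and len(replace_ranges[i-1]) != 1:
--             unreplaced_start_index = replace_ranges[i-1][1]
--         else:
--             unreplaced_start_index = 0
--         unreplaced_end_index = replace_ranges[i][0]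
--         str_parts.append(string[unreplaced_start_index:unreplaced_end_index])
--         str_parts.append(replace_string)
--     # Add the last (unreplaced) part to str_parts.
--     if len(replace_ranges[-1]) == 1:
--         unreplaced_start_index = len(string)
--     else:
--         unreplaced_start_index = replace_ranges[-1][1]
--     str_parts.append(string[unreplaced_start_index:])
--     return str_parts
-- ===== SOURCE B (Python) =====
-- def _str_parts(string, replace_ranges, replace_with):
--     """Divide `string` into parts divided outside of `replace_ranges`
--     and with `replace_with` inserted."""
--     def build(pairs):
--         # Returns (parts for `pairs`, start of the unreplaced text after them).
--         if not pairs: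
--             return [], 0
--         parts, end = build(pairs[:-1])
--         r, rep = pairs[-1]
--         parts += [string[end:r[0]], rep]
--         return parts, (len(string) if len(r) == 1 else r[1])
--     parts, end = build(list(zip(replace_ranges, replace_with)))
--     parts.append(string[end:])
--     return parts
-- ===== Notes on version B (the rewrite author's own statement) =====
-- stated objective: alternative
-- what changed: B replaces A's indexed forward loop with its three-way i>0/len==1 lookback by a recursive function that peels the (range, replacement) pairs from the RIGHT and returns the next-unreplaced-start pointer upward together with the parts, so no index arithmetic into replace_ranges remains.
import Mathlib
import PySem

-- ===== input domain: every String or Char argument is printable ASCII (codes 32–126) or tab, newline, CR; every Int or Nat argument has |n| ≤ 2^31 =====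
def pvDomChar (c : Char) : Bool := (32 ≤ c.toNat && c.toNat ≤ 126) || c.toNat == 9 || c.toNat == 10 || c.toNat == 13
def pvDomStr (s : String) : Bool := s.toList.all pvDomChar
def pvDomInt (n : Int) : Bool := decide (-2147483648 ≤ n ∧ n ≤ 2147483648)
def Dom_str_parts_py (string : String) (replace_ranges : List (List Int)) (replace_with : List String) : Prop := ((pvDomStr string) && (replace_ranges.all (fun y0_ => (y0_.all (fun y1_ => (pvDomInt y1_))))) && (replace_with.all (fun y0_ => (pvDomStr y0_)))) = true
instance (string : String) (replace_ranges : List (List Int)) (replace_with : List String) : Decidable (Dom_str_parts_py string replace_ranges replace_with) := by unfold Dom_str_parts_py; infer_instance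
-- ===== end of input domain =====

-- B replaces A's indexed forward loop (three-way i>0/len==1 lookback) by a recursion that peels
-- the zipped (range, replacement) pairs from the right and returns the next-unreplaced-start
-- pointer upward; same return value, a different decomposition.

-- ===== PORT A =====
def str_parts_py (string : String) (replace_ranges : List (List Int)) (replace_with : List String) : List String :=
  let parts := (PySem.List.enumerate replace_ranges).foldl (fun acc p =>
    let i := p.1
    let replace_string := PySem.List.pyGetD replace_with i ""
    let unreplaced_start_index : Int :=
      if i > 0 ∧ (PySem.List.pyGetD replace_ranges (i - 1) []).length = 1 then
        PySem.Str.len string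
      else if i > 0 ∧ ¬ (PySem.List.pyGetD replace_ranges (i - 1) []).length = 1 then
        PySem.List.pyGetD (PySem.List.pyGetD replace_ranges (i - 1) []) 1 0
      else 0
    let unreplaced_end_index := PySem.List.pyGetD (PySem.List.pyGetD replace_ranges i []) 0 0
    acc ++ [PySem.Str.slice string (some unreplaced_start_index) (some unreplaced_end_index), replace_string]) []
  let last := PySem.List.pyGetD replace_ranges (-1) []
  let unreplaced_start_index : Int :=
    if last.length = 1 then PySem.Str.len string else PySem.List.pyGetD last 1 0
  parts ++ [PySem.Str.slice string (some unreplaced_start_index) none]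

-- ===== PORT B =====
/-- Source B's inner `build(pairs)`: recursion on `pairs[:-1]`, returning (parts, next start). -/
def pvBuildB (string : String) (pairs : List (List Int × String)) : List String × Int :=
  if h : pairs = [] then ([], 0)
  else
    let prev := pvBuildB string pairs.dropLast
    let p := PySem.List.pyGetD pairs (-1) ([], "")
    (prev.1 ++ [PySem.Str.slice string (some prev.2) (some (PySem.List.pyGetD p.1 0 0)), p.2],
     if p.1.length = 1 then PySem.Str.len string else PySem.List.pyGetD p.1 1 0)
termination_by pairs.length
decreasing_by simp [List.length_dropLast]; exact List.length_pos_of_ne_nil h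

def str_parts_py_alt (string : String) (replace_ranges : List (List Int)) (replace_with : List String) : List String :=
  let res := pvBuildB string (replace_ranges.zip replace_with)
  res.1 ++ [PySem.Str.slice string (some res.2) none]

-- ===== PRECONDITION & SPEC =====
-- Pre_ excludes exactly the inputs on which the Python A raises IndexError: an empty
-- replace_ranges (replace_ranges[-1]), an empty inner range (r[0]/r[1]), or replace_with
-- shorter than replace_ranges (replace_with[i]).
def Pre_str_parts_py (string : String) (replace_ranges : List (List Int)) (replace_with : List String) : Prop :=
  replace_ranges ≠ [] ∧ replace_ranges.length ≤ replace_with.length ∧ ∀ r ∈ replace_ranges, r ≠ []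
instance (string : String) (replace_ranges : List (List Int)) (replace_with : List String) : Decidable (Pre_str_parts_py string replace_ranges replace_with) := by unfold Pre_str_parts_py; infer_instance
def pvWitness_str_parts_py : String × List (List Int) × List String := ("abcdef", [[1, 3], [4]], ["X", "YZ"])

def Spec_str_parts_py (string : String) (replace_ranges : List (List Int)) (replace_with : List String) (out : List String) : Prop := out = str_parts_py_alt string replace_ranges replace_with
instance (string : String) (replace_ranges : List (List Int)) (replace_with : List String) (out : List String) : Decidable (Spec_str_parts_py string replace_ranges replace_with out) := by unfold Spec_str_parts_py; infer_instance

-- ===== CLAIM (what is proved, stated in full; the proofs are below) =====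
def Claim_equal_str_parts_py : Prop := ∀ (string : String) (replace_ranges : List (List Int)) (replace_with : List String), Dom_str_parts_py string replace_ranges replace_with → Pre_str_parts_py string replace_ranges replace_with → Spec_str_parts_py string replace_ranges replace_with (str_parts_py string replace_ranges replace_with)

-- ===== LEMMAS AND PROOFS =====

/-- Where the unreplaced part following range `r` starts. -/
def pvNextStart (string : String) (r : List Int) : Int :=
  if r.length = 1 then PySem.Str.len string else PySem.List.pyGetD r 1 0

/-- Reference form of the loop: carried start pointer over the zipped pairs. -/
def pvGo (string : String) : Int → List (List Int × String) → List String
  | _, [] => []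
  | s, (r, w) :: rest =>
      PySem.Str.slice string (some s) (some (PySem.List.pyGetD r 0 0)) :: w ::
        pvGo string (pvNextStart string r) rest

/-- The start pointer left after processing the pairs. -/
def pvEnd (string : String) : Int → List (List Int × String) → Int
  | s, [] => s
  | _, (r, _) :: rest => pvEnd string (pvNextStart string r) rest

/-- The start index A's three-way branch computes at loop index `k`. -/
def pvStartIdx (string : String) (rr : List (List Int)) (k : Nat) : Int :=
  if k = 0 then 0 else pvNextStart string (rr.getD (k - 1) [])

lemma pvGo_snoc (string : String) (r : List Int) (w : String) :
    ∀ (ps : List (List Int × String)) (s : Int),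
    pvGo string s (ps ++ [(r, w)]) =
      pvGo string s ps ++
        [PySem.Str.slice string (some (pvEnd string s ps)) (some (PySem.List.pyGetD r 0 0)), w] := by
  intro ps
  induction ps with
  | nil => intro s; simp [pvGo, pvEnd]
  | cons p ps' ih => intro s; cases p; simp [pvGo, pvEnd, ih]

lemma pvEnd_snoc (string : String) (r : List Int) (w : String) :
    ∀ (ps : List (List Int × String)) (s : Int),
    pvEnd string s (ps ++ [(r, w)]) = pvNextStart string r := by
  intro ps
  induction ps with
  | nil => intro s; simp [pvEnd]
  | cons p ps' ih => intro s; cases p; simp [pvEnd, ih]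

lemma pvBuildB_eq (string : String) (ps : List (List Int × String)) :
    pvBuildB string ps = (pvGo string 0 ps, pvEnd string 0 ps) := by
  induction ps using List.reverseRecOn with
  | nil => rw [pvBuildB.eq_def]; simp [pvGo, pvEnd]
  | append_singleton ps p ih =>
    cases p with
    | mk r w =>
      rw [pvBuildB.eq_def]
      simp only [List.append_ne_nil_of_right_ne_nil _ (by simp : ([(r, w)] : List (List Int × String)) ≠ []),
        dite_false, List.dropLast_concat, ih, PySem.List.pyGetD_neg_one_append_singleton]
      rw [pvGo_snoc, pvEnd_snoc]
      rfl

lemma pvEnd_last (string : String) :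
    ∀ (ps : List (List Int × String)) (h : ps ≠ []) (s : Int),
    pvEnd string s ps = pvNextStart string (ps.getLast h).1 := by
  intro ps
  induction ps with
  | nil => intro h; exact absurd rfl h
  | cons p ps' ih =>
    intro h s
    cases p with
    | mk r w =>
      cases ps' with
      | nil => simp [pvEnd]
      | cons q qs => simp only [pvEnd, List.getLast_cons (by simp : q :: qs ≠ [])]; exact ih (by simp) (pvNextStart string r)

lemma pvZipLast (rr : List (List Int)) (rw : List String) (h : rr ≠ [])
    (hl : rr.length ≤ rw.length) :
    ((rr.zip rw).getLast (by
      intro hc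
      match rr, rw with
      | [], _ => exact h rfl
      | _ :: _, [] => simp at hl
      | _ :: _, _ :: _ => simp at hc)).1 = rr.getLast h := by
  have hpos : 0 < rr.length := List.length_pos_of_ne_nil h
  rw [List.getLast_eq_getElem, List.getLast_eq_getElem]
  have hlen : (rr.zip rw).length = rr.length := by rw [List.length_zip]; omega
  simp only [hlen, List.getElem_zip]

lemma pvLoopA (string : String) (rr : List (List Int)) (rw : List String)
    (hlen : rr.length ≤ rw.length) :
    ∀ (n k : Nat) (acc : List String), rr.length - k = n →
    (PySem.List.enumerate (rr.drop k) (k : Int)).foldl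
      (fun acc p => acc ++ [PySem.Str.slice string
          (some (if p.1 > 0 ∧ (PySem.List.pyGetD rr (p.1 - 1) []).length = 1 then PySem.Str.len string
                 else if p.1 > 0 ∧ ¬(PySem.List.pyGetD rr (p.1 - 1) []).length = 1 then
                   PySem.List.pyGetD (PySem.List.pyGetD rr (p.1 - 1) []) 1 0
                 else 0))
          (some (PySem.List.pyGetD (PySem.List.pyGetD rr p.1 []) 0 0)),
        PySem.List.pyGetD rw p.1 ""]) acc
    = acc ++ pvGo string (pvStartIdx string rr k) ((rr.drop k).zip (rw.drop k)) := by
  intro n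
  induction n with
  | zero =>
    intro k acc h
    have hk : rr.length ≤ k := by omega
    rw [List.drop_eq_nil_of_le hk]
    simp [PySem.List.enumerate, pvGo]
  | succ n ih =>
    intro k acc h
    have hk : k < rr.length := by omega
    have hkw : k < rw.length := lt_of_lt_of_le hk hlen
    rw [List.drop_eq_getElem_cons hk, List.drop_eq_getElem_cons hkw]
    rw [show PySem.List.enumerate (rr[k] :: rr.drop (k + 1)) (k : Int)
          = ((k : Int), rr[k]) :: PySem.List.enumerate (rr.drop (k + 1)) ((k : Int) + 1) by
        simp [PySem.List.enumerate]]
    rw [List.foldl_cons]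
    have hstart : (if (k : Int) > 0 ∧ (PySem.List.pyGetD rr ((k : Int) - 1) []).length = 1 then PySem.Str.len string
                 else if (k : Int) > 0 ∧ ¬(PySem.List.pyGetD rr ((k : Int) - 1) []).length = 1 then
                   PySem.List.pyGetD (PySem.List.pyGetD rr ((k : Int) - 1) []) 1 0
                 else 0) = pvStartIdx string rr k := by
      by_cases hk0 : k = 0
      · subst hk0; simp [pvStartIdx]
      · have hc : ((k : Int)) - 1 = ((k - 1 : Nat) : Int) := by omega
        have hpos : (0 : Int) < (k : Int) := by omega
        rw [hc, PySem.List.pyGetD_natCast]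
        simp only [pvStartIdx, if_neg hk0, pvNextStart, gt_iff_lt, hpos, true_and]
        split_ifs with h1 <;> simp_all
    have hget : PySem.List.pyGetD rr (k : Int) [] = rr[k] := by
      rw [PySem.List.pyGetD_natCast]; exact List.getD_eq_getElem _ _ hk
    have hgetw : PySem.List.pyGetD rw (k : Int) "" = rw[k] := by
      rw [PySem.List.pyGetD_natCast]; exact List.getD_eq_getElem _ _ hkw
    simp only [hstart, hget, hgetw]
    rw [show ((k : Int) + 1) = ((k + 1 : Nat) : Int) by omega]
    rw [ih (k + 1) _ (by omega)]
    simp only [List.zip_cons_cons, pvGo]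
    rw [show pvStartIdx string rr (k + 1) = pvNextStart string rr[k] by
      simp [pvStartIdx, List.getD, List.getElem?_eq_getElem hk]]
    simp

-- ===== VERDICT (by name: the statement is the Claim_ definition above) =====
theorem str_parts_py_spec : Claim_equal_str_parts_py := by
  unfold Claim_equal_str_parts_py
  intro string rr rw _hdom hpre
  obtain ⟨h1, h2, _h3⟩ := hpre
  unfold Spec_str_parts_py
  simp only [str_parts_py, str_parts_py_alt, pvBuildB_eq]
  have hA := pvLoopA string rr rw h2 rr.length 0 [] (by omega)
  simp only [Nat.cast_zero, List.drop_zero] at hA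
  rw [hA]
  have hzip : rr.zip rw ≠ [] := by
    intro hc
    match rr, rw with
    | [], _ => exact h1 rfl
    | _ :: _, [] => simp at h2
    | _ :: _, _ :: _ => simp at hc
  rw [pvEnd_last string _ hzip 0, pvZipLast rr rw h1 h2,
    PySem.List.pyGetD_neg_one _ _ h1]
  simp [pvStartIdx, pvNextStart]
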